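-- pv_equiv track=rewrite | github.com/Sergei19xx/N-Shead | Assignment 2/Sergei_Question2_Chapter_2a.py | separate_and_convert
-- ===== SOURCE A (Python) =====
-- def separate_and_convert(input_string):
--     # Define translation tables to map digits to none and non-digits to empty string
--     digit_translation = str.maketrans('', '', '02468')
--     non_digit_translation = str.maketrans('', '', 'abcdefghijklmnopqrstuvwxyzABCDEFGHIJKLMNOPQRSTUVWXYZ')
--
--     # Separate digits and letters from the input string
--     number_string = input_string.translate(non_digit_translation)
--     letter_string = input_string.translate(digit_translation)
--
--     # Filter odd numbers and collect lowercase and uppercase letters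
--     odd_numbers_ascii = ''.join(str(ord(char)) for char in number_string if char.isdigit() and int(char) % 2 != 0)
--     all_letters = ''.join(char for char in letter_string if char.isalpha())
--
--     return odd_numbers_ascii, all_letters
-- ===== SOURCE B (Python) =====
-- def separate_and_convert(input_string):
--     odd_parts = []
--     letter_parts = []
--     for ch in input_string:
--         if ch.isdigit() and int(ch) % 2 != 0:
--             odd_parts.append(str(ord(ch)))
--         elif ch.isalpha():
--             letter_parts.append(ch)
--     return ''.join(odd_parts), ''.join(letter_parts)
-- ===== Notes on version B (the rewrite author's own statement) =====
-- stated objective: simpler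
-- what changed: Replaced the two str.maketrans/translate deletion tables plus two separate generator passes by one single loop that classifies each character once into the two output lists.
import Mathlib
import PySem

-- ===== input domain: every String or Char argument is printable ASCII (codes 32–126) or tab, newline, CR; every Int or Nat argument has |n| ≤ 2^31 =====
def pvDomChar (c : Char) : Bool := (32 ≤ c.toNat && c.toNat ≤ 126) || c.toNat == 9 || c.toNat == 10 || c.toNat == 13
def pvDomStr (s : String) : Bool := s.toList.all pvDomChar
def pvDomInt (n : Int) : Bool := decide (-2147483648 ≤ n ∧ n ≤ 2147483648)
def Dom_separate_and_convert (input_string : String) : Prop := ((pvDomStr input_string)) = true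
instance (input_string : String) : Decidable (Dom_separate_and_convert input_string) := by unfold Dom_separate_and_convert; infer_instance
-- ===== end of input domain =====

-- B replaces A's two maketrans/translate deletion tables and four passes by one loop
-- classifying each character once; objective: simpler. Return values are identical.

-- ===== PORT A =====
-- str.maketrans('', '', '02468') / translate = delete these characters
def pvEvens : List Char := ['0', '2', '4', '6', '8']
def pvLetters : List Char :=
  ['a','b','c','d','e','f','g','h','i','j','k','l','m','n','o','p','q','r','s','t','u','v','w','x','y','z',
   'A','B','C','D','E','F','G','H','I','J','K','L','M','N','O','P','Q','R','S','T','U','V','W','X','Y','Z']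

-- char.isdigit() and int(char) % 2 != 0   (int(char) never raises when isdigit holds on Dom)
def pvOddDigit (c : Char) : Bool :=
  PySem.Chars.isdigit c && ((PySem.Int.ofChars? [c]).getD 0) % 2 != 0

def separate_and_convert (input_string : String) : String × String :=
  let cs := input_string.toList
  let number_string := cs.filter (fun c => !(pvLetters.contains c))
  let letter_string := cs.filter (fun c => !(pvEvens.contains c))
  let odd_numbers_ascii :=
    (number_string.filter pvOddDigit).flatMap (fun c => PySem.Int.toChars (c.toNat : Int))
  let all_letters := letter_string.filter PySem.Chars.isalpha
  (String.mk odd_numbers_ascii, String.mk all_letters)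

-- ===== PORT B =====
-- single loop: append str(ord(ch)) to the first list on an odd digit, ch to the second on a letter
def pvAltStep (acc : List Char × List Char) (c : Char) : List Char × List Char :=
  if pvOddDigit c then
    (acc.1 ++ PySem.Int.toChars (c.toNat : Int), acc.2)
  else if PySem.Chars.isalpha c then
    (acc.1, acc.2 ++ [c])
  else acc

def separate_and_convert_alt (input_string : String) : String × String :=
  let r := input_string.toList.foldl pvAltStep ([], [])
  (String.mk r.1, String.mk r.2)

-- ===== PRECONDITION & SPEC =====
def Spec_separate_and_convert (input_string : String) (out : String × String) : Prop := out = separate_and_convert_alt input_string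
instance (input_string : String) (out : String × String) : Decidable (Spec_separate_and_convert input_string out) := by unfold Spec_separate_and_convert; infer_instance

-- ===== CLAIM (what is proved, stated in full; the proofs are below) =====
def Claim_equal_separate_and_convert : Prop := ∀ (input_string : String), Dom_separate_and_convert input_string → Spec_separate_and_convert input_string (separate_and_convert input_string)

-- ===== LEMMAS AND PROOFS =====

-- an odd-digit character is never a letter
lemma oddDigit_not_letter (c : Char) (h : pvOddDigit c = true) : c ∉ pvLetters := by
  have hd : PySem.Chars.isdigit c = true := by
    simp [pvOddDigit, Bool.and_eq_true] at h; exact h.1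
  simp [PySem.Chars.isdigit, Char.le_def, UInt32.le_iff_toNat_le] at hd
  simp [pvLetters, Char.ext_iff, UInt32.ext_iff]
  omega

-- an alphabetic character is neither a digit nor in '02468'
lemma alpha_not_digit (c : Char) (h : PySem.Chars.isalpha c = true) :
    PySem.Chars.isdigit c = false ∧ c ∉ pvEvens := by
  simp [PySem.Chars.isalpha, PySem.Chars.isupper, PySem.Chars.islower, Char.le_def,
    UInt32.le_iff_toNat_le] at h
  constructor
  · simp [PySem.Chars.isdigit, Char.le_def, UInt32.le_iff_toNat_le]
    omega
  · simp [pvEvens, Char.ext_iff, UInt32.ext_iff]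
    omega

-- B's fold appends A's two filtered outputs to the accumulator
lemma altStep_foldl (cs : List Char) (o l : List Char) :
    cs.foldl pvAltStep (o, l) =
      (o ++ (cs.filter pvOddDigit).flatMap (fun c => PySem.Int.toChars (c.toNat : Int)),
       l ++ (cs.filter (fun c => !pvOddDigit c && PySem.Chars.isalpha c))) := by
  induction cs generalizing o l with
  | nil => simp
  | cons c cs ih =>
    by_cases hd : pvOddDigit c = true
    · simp [List.foldl_cons, pvAltStep, ih, hd, List.append_assoc]
    · by_cases ha : PySem.Chars.isalpha c = true
      · simp [List.foldl_cons, pvAltStep, ih, hd, ha, List.append_assoc]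
      · simp [List.foldl_cons, pvAltStep, ih, hd, ha]

-- A's letter-table pass followed by the digit filter equals the plain digit filter
lemma numberFilter_eq (cs : List Char) :
    (cs.filter (fun c => !(pvLetters.contains c))).filter pvOddDigit = cs.filter pvOddDigit := by
  rw [List.filter_filter]
  apply List.filter_congr
  intro c _
  by_cases h : pvOddDigit c = true
  · simp [h, oddDigit_not_letter c h]
  · simp [h]

-- A's even-digit-table pass followed by the alpha filter equals B's elif condition
lemma letterFilter_eq (cs : List Char) :
    (cs.filter (fun c => !(pvEvens.contains c))).filter PySem.Chars.isalpha =
      cs.filter (fun c => !pvOddDigit c && PySem.Chars.isalpha c) := by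
  rw [List.filter_filter]
  apply List.filter_congr
  intro c _
  by_cases h : PySem.Chars.isalpha c = true
  · rcases alpha_not_digit c h with ⟨h1, h2⟩
    simp [h, h1, h2, pvOddDigit]
  · simp [h]

-- ===== VERDICT (by name: the statement is the Claim_ definition above) =====
theorem separate_and_convert_spec : Claim_equal_separate_and_convert := by
  intro s _
  show _ = _
  simp only [separate_and_convert, separate_and_convert_alt, altStep_foldl, List.nil_append,
    numberFilter_eq, letterFilter_eq]
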